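-- pv_equiv track=rewrite | github.com/HurmakR/testie | s1t1.py | kthTerm
-- ===== SOURCE A (Python) =====
-- def kthTerm(n, k):
--     sum_list = [1]
--     temp_list = []
--     counter = 1
--     while len(sum_list) <= k:
--         temp_list.append(n**counter)
--         for i in sum_list:
--             temp_list.append((n**counter) + i)
--         sum_list.extend(temp_list)
--         temp_list = []
--         counter += 1
--     return sum_list[k - 1]
-- ===== SOURCE B (Python) =====
-- def kthTerm(n, k):
--     total = 0
--     power = 1
--     while k > 0:
--         if k % 2 == 1:
--             total += power
--         k //= 2
--         power *= n
--     return total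
-- ===== Notes on version B (the rewrite author's own statement) =====
-- stated objective: faster
-- what changed: Instead of materialising the whole list of the first k terms by doubling rounds, B reads the binary digits of k directly and sums n^i for each set bit i.
-- intended difference: For k = 0, A returns 1 only because sum_list[k-1] wraps around to the last element of [1] (negative-index accident); B returns 0, the empty sum of powers, which is the intended value of the 0th term. — e.g. on kthTerm(3, 0): A returns 1, B returns 0
import Mathlib
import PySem

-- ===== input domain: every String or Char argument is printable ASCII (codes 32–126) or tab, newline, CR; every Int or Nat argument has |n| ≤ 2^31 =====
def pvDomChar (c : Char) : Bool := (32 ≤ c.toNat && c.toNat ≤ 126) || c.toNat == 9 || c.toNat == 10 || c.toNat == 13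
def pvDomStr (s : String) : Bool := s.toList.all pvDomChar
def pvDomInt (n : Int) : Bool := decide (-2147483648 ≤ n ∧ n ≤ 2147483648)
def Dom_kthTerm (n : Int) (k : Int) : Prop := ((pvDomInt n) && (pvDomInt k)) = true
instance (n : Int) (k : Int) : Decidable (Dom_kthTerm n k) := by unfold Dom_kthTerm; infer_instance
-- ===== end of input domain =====

-- B replaces A's round-by-round construction of the first k terms with a direct
-- scan of the binary digits of k, summing n^i for set bits (asymptotically faster).
-- ===== PORT A =====
-- the while loop: each round appends n^counter and n^counter + i for every i already present
def kthTermLoop (n : Int) (k : Int) (sumList : List Int) (counter : Int) : List Int :=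
  if (sumList.length : Int) ≤ k then
    kthTermLoop n k
      (sumList ++ (n ^ counter.toNat :: sumList.map (fun i => n ^ counter.toNat + i)))
      (counter + 1)
  else sumList
termination_by (k + 1 - sumList.length).toNat
decreasing_by simp; omega

def kthTerm (n : Int) (k : Int) : Int :=
  (PySem.List.pyGet? (kthTermLoop n k [1] 1) (k - 1)).getD 0  -- Pre_ keeps k-1 in range

-- ===== PORT B =====
def kthTermAltLoop (n : Int) (k : Int) (total : Int) (power : Int) : Int :=
  if 0 < k then
    kthTermAltLoop n (PySem.Int.floordiv k 2)
      (if PySem.Int.mod k 2 = 1 then total + power else total) (power * n)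
  else total
termination_by k.toNat
decreasing_by
  have hfd := PySem.Int.floordiv_eq_ediv_of_pos (a := k) (b := 2) (by omega)
  rw [hfd]; omega

def kthTerm_alt (n : Int) (k : Int) : Int := kthTermAltLoop n k 0 1

-- ===== PRECONDITION & SPEC =====
-- Pre_ excludes k < 0, on which A raises IndexError (sum_list[k-1] out of range).
def Pre_kthTerm (n : Int) (k : Int) : Prop := 0 ≤ k
instance (n : Int) (k : Int) : Decidable (Pre_kthTerm n k) := by unfold Pre_kthTerm; infer_instance
def pvWitness_kthTerm : Int × Int := (3, 5)

-- For k = 0, A returns 1 only because sum_list[k-1] wraps around to the last element of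
-- [1] (negative-index accident); B returns 0, the empty sum of powers, the intended 0th term.
def D_kthTerm (n : Int) (k : Int) : Prop := k = 0
instance (n : Int) (k : Int) : Decidable (D_kthTerm n k) := by unfold D_kthTerm; infer_instance
def Spec_kthTerm (n : Int) (k : Int) (out : Int) : Prop := ¬ D_kthTerm n k → out = kthTerm_alt n k
instance (n : Int) (k : Int) (out : Int) : Decidable (Spec_kthTerm n k out) := by
  unfold Spec_kthTerm; infer_instance
def pvDiffWitness_kthTerm : Int × Int := (3, 0)
def pvDiffWitnessOut_kthTerm : Int × Int := (1, 0)

-- ===== CLAIM (what is proved, stated in full; the proofs are below) =====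
def Claim_unchanged_kthTerm : Prop :=
  ∀ (n : Int) (k : Int), Dom_kthTerm n k → Pre_kthTerm n k → Spec_kthTerm n k (kthTerm n k)
def Claim_changed_kthTerm : Prop :=
  Dom_kthTerm (pvDiffWitness_kthTerm.1) (pvDiffWitness_kthTerm.2) ∧
  Pre_kthTerm (pvDiffWitness_kthTerm.1) (pvDiffWitness_kthTerm.2) ∧
  D_kthTerm (pvDiffWitness_kthTerm.1) (pvDiffWitness_kthTerm.2) ∧
  kthTerm (pvDiffWitness_kthTerm.1) (pvDiffWitness_kthTerm.2) = pvDiffWitnessOut_kthTerm.1 ∧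
  kthTerm_alt (pvDiffWitness_kthTerm.1) (pvDiffWitness_kthTerm.2) = pvDiffWitnessOut_kthTerm.2 ∧
  pvDiffWitnessOut_kthTerm.1 ≠ pvDiffWitnessOut_kthTerm.2
def Claim_exact_kthTerm : Prop :=
  ∀ (n : Int) (k : Int), Dom_kthTerm n k → Pre_kthTerm n k → D_kthTerm n k →
    kthTerm n k ≠ kthTerm_alt n k

-- ===== LEMMAS AND PROOFS =====

/-- The mathematical value both programs compute: sum of n^i over the set bits of m. -/
def bitSum (n : Int) : Nat → Int
  | 0 => 0
  | m + 1 => ((m + 1) % 2 : Nat) + n * bitSum n ((m + 1) / 2)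

lemma bitSum_rec (n : Int) (m : Nat) :
    bitSum n m = ((m % 2 : Nat) : Int) + n * bitSum n (m / 2) := by
  cases m with
  | zero => simp [bitSum]
  | succ m => simp [bitSum]

/-- Adding bit c on top of m < 2^c adds n^c to the bit sum. -/
lemma bitSum_two_pow_add (n : Int) (c m : Nat) (hm : m < 2 ^ c) :
    bitSum n (2 ^ c + m) = n ^ c + bitSum n m := by
  induction c generalizing m with
  | zero =>
    interval_cases m
    norm_num [bitSum]
  | succ c ih =>
    rw [bitSum_rec n (2 ^ (c + 1) + m)]
    have h2 : (2 ^ (c + 1) + m) % 2 = m % 2 := by omega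
    have h3 : (2 ^ (c + 1) + m) / 2 = 2 ^ c + m / 2 := by omega
    rw [h2, h3, ih (m / 2) (by omega), bitSum_rec n m]
    ring

lemma altLoop_spec (n : Int) : ∀ (k total power : Int),
    kthTermAltLoop n k total power = total + power * bitSum n k.toNat := by
  intro k
  induction hK : k.toNat using Nat.strong_induction_on generalizing k with
  | _ K ih =>
    intro total power
    rw [kthTermAltLoop]
    split_ifs with h hm2
    · -- 0 < k, k % 2 = 1
      have hd : PySem.Int.floordiv k 2 = k / 2 :=
        PySem.Int.floordiv_eq_ediv_of_pos (by omega)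
      have hm : PySem.Int.mod k 2 = k % 2 :=
        PySem.Int.mod_eq_emod_of_pos (by omega)
      rw [hd, ih (k / 2).toNat (by omega) (k / 2) rfl]
      rw [← hK, bitSum_rec n k.toNat]
      have h2 : (k / 2).toNat = k.toNat / 2 := by omega
      have hmod : (k.toNat % 2 : Nat) = 1 := by rw [hm] at hm2; omega
      rw [h2, hmod]
      push_cast; ring
    · -- 0 < k, k % 2 ≠ 1
      have hd : PySem.Int.floordiv k 2 = k / 2 :=
        PySem.Int.floordiv_eq_ediv_of_pos (by omega)
      have hm : PySem.Int.mod k 2 = k % 2 :=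
        PySem.Int.mod_eq_emod_of_pos (by omega)
      rw [hd, ih (k / 2).toNat (by omega) (k / 2) rfl]
      rw [← hK, bitSum_rec n k.toNat]
      have h2 : (k / 2).toNat = k.toNat / 2 := by omega
      have hmod : (k.toNat % 2 : Nat) = 0 := by rw [hm] at hm2; omega
      rw [h2, hmod]
      push_cast; ring
    · -- k ≤ 0
      have h0 : K = 0 := by omega
      rw [h0]
      simp [bitSum]

/-- Invariant of A's while loop: after round c the list has length 2^c - 1 and
its (j+1)-st element is bitSum (j+1); on exit the list is longer than k. -/
lemma loop_spec (n k : Int) : ∀ (c : Nat) (L : List Int), 1 ≤ c →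
    L.length = 2 ^ c - 1 →
    (∀ j, (h : j < L.length) → L[j] = bitSum n (j + 1)) →
    k < ((kthTermLoop n k L (c : Int)).length : Int) ∧
      ∀ j, (h : j < (kthTermLoop n k L (c : Int)).length) →
        (kthTermLoop n k L (c : Int))[j] = bitSum n (j + 1) := by
  intro c
  induction hfuel : (k + 1 - (2 ^ c - 1 : Nat)).toNat using Nat.strong_induction_on
    generalizing c with
  | _ F ih =>
    intro L hc hlen hel
    rw [kthTermLoop]
    split_ifs with h
    · -- one more round
      set p : Int := n ^ ((c : Int)).toNat with hp
      have hptoNat : ((c : Int)).toNat = c := by omega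
      have hc' : ((c : Int) + 1) = ((c + 1 : Nat) : Int) := by push_cast; ring
      have hpow : (2 : Nat) ^ (c + 1) = 2 * 2 ^ c := by ring
      have hone : (1 : Nat) ≤ 2 ^ c := Nat.one_le_two_pow
      have hlen' : (L ++ (p :: L.map (fun i => p + i))).length = 2 ^ (c + 1) - 1 := by
        simp [hlen]; omega
      have hel' : ∀ j, (h : j < (L ++ (p :: L.map (fun i => p + i))).length) →
          (L ++ (p :: L.map (fun i => p + i)))[j] = bitSum n (j + 1) := by
        intro j hj
        by_cases hjL : j < L.length
        · rw [List.getElem_append_left hjL]; exact hel j hjL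
        · rw [List.getElem_append_right (by omega)]
          by_cases hj0 : j = L.length
          · subst hj0
            simp [hp, hptoNat, hlen]
            have he : 2 ^ c - 1 + 1 = 2 ^ c + 0 := by omega
            rw [he, bitSum_two_pow_add n c 0 (by positivity), bitSum]
            ring
          · set i : Nat := j - L.length - 1 with hi
            have hji : j - L.length = i + 1 := by omega
            simp only [hji, List.getElem_cons_succ, List.getElem_map]
            have hiL : i < L.length := by simp at hj; omega
            rw [hel i hiL]
            have hjval : j + 1 = 2 ^ c + (i + 1) := by omega
            rw [hjval, bitSum_two_pow_add n c (i + 1) (by omega), hp, hptoNat]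
      have hfuel' : (k + 1 - ((2 ^ (c + 1) - 1 : Nat) : Int)).toNat < F := by
        rw [hlen] at h
        omega
      have := ih _ hfuel' (c + 1) rfl (L ++ (p :: L.map (fun i => p + i)))
        (by omega) hlen' hel'
      rw [hc']
      exact this
    · exact ⟨by omega, hel⟩

lemma kthTerm_eq_bitSum (n k : Int) (hk : 1 ≤ k) : kthTerm n k = bitSum n k.toNat := by
  unfold kthTerm
  have base := loop_spec n k 1 [1] le_rfl (by simp)
    (by intro j h
        have hj0 : j = 0 := by simpa using h
        subst hj0; norm_num [bitSum])
  have h1 : ((1 : Nat) : Int) = (1 : Int) := by norm_num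
  rw [h1] at base
  obtain ⟨hlong, hels⟩ := base
  set R := kthTermLoop n k [1] 1 with hR
  have hidx : (k - 1).toNat < R.length := by omega
  rw [PySem.List.pyGet?_of_nonneg _ (show (0:Int) ≤ k - 1 by omega)]
  rw [List.getElem?_eq_getElem hidx]
  simp only [Option.getD_some]
  rw [hels _ hidx]
  congr 1
  omega

lemma kthTermAlt_eq_bitSum (n k : Int) : kthTerm_alt n k = bitSum n k.toNat := by
  unfold kthTerm_alt
  rw [altLoop_spec]
  ring

lemma kthTermA_at_zero (n : Int) : kthTerm n 0 = 1 := by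
  unfold kthTerm
  rw [kthTermLoop]
  norm_num
  decide

lemma kthTermAlt_at_zero (n : Int) : kthTerm_alt n 0 = 0 := by
  rw [kthTermAlt_eq_bitSum]; simp [bitSum]

-- ===== VERDICT (by name: the statement is the Claim_ definition above) =====
theorem kthTerm_spec : Claim_unchanged_kthTerm := by
  intro n k _ hpre hD
  have hk : 1 ≤ k := by
    unfold Pre_kthTerm at hpre; unfold D_kthTerm at hD; omega
  rw [kthTerm_eq_bitSum n k hk, kthTermAlt_eq_bitSum]

theorem kthTerm_changed : Claim_changed_kthTerm := by
  unfold Claim_changed_kthTerm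
  refine ⟨by decide, by decide, by decide, ?_, ?_, by decide⟩
  · exact kthTermA_at_zero 3
  · exact kthTermAlt_at_zero 3

theorem kthTerm_tight : Claim_exact_kthTerm := by
  intro n k _ _ hD
  unfold D_kthTerm at hD
  subst hD
  rw [kthTermA_at_zero, kthTermAlt_at_zero]
  decide
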